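-- pv_equiv track=rewrite | github.com/ADG-Projects/IngestLab | chunking_pipeline/custom_chunker.py | get_chunk_summary
-- ===== SOURCE A (Python) =====
-- from typing import Any, Dict, List, Optional
--
-- def get_chunk_summary(chunks: List[Dict[str, Any]]) -> Dict[str, Any]:
--     """Generate summary statistics for a list of chunks."""
--     if not chunks:
--         return {
--             "count": 0,
--             "total_chars": 0,
--             "min_chars": 0,
--             "max_chars": 0,
--             "avg_chars": 0,
--         }
--
--     char_counts = [len(c.get("text") or "") for c in chunks]
--     return {
--         "count": len(chunks),
--         "total_chars": sum(char_counts),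
--         "min_chars": min(char_counts),
--         "max_chars": max(char_counts),
--         "avg_chars": sum(char_counts) // len(char_counts) if char_counts else 0,
--     }
-- ===== SOURCE B (Python) =====
-- def get_chunk_summary(chunks):
--     """Generate summary statistics for a list of chunks (single fused pass)."""
--     if not chunks:
--         return {
--             "count": 0,
--             "total_chars": 0,
--             "min_chars": 0,
--             "max_chars": 0,
--             "avg_chars": 0,
--         }
--     t0 = chunks[0].get("text")
--     first = len(t0) if t0 is not None else 0
--     count, total, mn, mx = 1, first, first, first
--     for c in chunks[1:]:
--         t = c.get("text")
--         n = len(t) if t is not None else 0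
--         count += 1
--         total += n
--         if n < mn:
--             mn = n
--         if n > mx:
--             mx = n
--     return {
--         "count": count,
--         "total_chars": total,
--         "min_chars": mn,
--         "max_chars": mx,
--         "avg_chars": total // count,
--     }
-- ===== Notes on version B (the rewrite author's own statement) =====
-- stated objective: alternative
-- what changed: Replaces the intermediate char_counts list plus four separate reductions (sum, min, max, sum//len) with one fused pass that keeps running count/total/min/max accumulators seeded from the first chunk.
import Mathlib
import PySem

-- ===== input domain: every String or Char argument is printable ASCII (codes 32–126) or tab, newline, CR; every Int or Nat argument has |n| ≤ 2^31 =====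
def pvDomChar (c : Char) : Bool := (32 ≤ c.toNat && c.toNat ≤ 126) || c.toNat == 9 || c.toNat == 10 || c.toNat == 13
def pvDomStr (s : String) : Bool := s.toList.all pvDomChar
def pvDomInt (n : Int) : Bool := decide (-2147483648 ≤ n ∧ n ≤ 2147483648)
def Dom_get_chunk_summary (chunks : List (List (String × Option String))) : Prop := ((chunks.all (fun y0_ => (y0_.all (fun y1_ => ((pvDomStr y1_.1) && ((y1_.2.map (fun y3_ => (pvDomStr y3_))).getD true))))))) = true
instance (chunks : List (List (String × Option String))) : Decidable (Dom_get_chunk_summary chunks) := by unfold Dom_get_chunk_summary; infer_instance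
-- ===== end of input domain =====

-- B fuses A's intermediate char_counts list and four separate reductions into one
-- running-accumulator pass; proved to return the same dict on every input.


-- ===== PORT A =====
-- len(c.get("text") or "") : dict.get default None; `v or ""` keeps a truthy (nonempty) string
def aTextLen (c : List (String × Option String)) : Int :=
  PySem.Str.len
    (match c.lookup "text" with
     | some (some s) => if s == "" then "" else s
     | _ => "")

def get_chunk_summary (chunks : List (List (String × Option String))) : List (String × Int) :=
  match chunks with
  | [] =>
    [("count", 0), ("total_chars", 0), ("min_chars", 0), ("max_chars", 0), ("avg_chars", 0)]
  | _ =>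
    let char_counts := chunks.map aTextLen
    [("count", (chunks.length : Int)),
     ("total_chars", char_counts.sum),
     -- min()/max(): chunks (hence char_counts) is nonempty here, so min?/max? is `some`
     ("min_chars", (PySem.List.min? char_counts (fun y => y)).getD 0),
     ("max_chars", (PySem.List.max? char_counts (fun y => y)).getD 0),
     ("avg_chars",
       if char_counts ≠ [] then PySem.Int.floordiv char_counts.sum (char_counts.length : Int)
       else 0)]

-- ===== PORT B =====
-- B reads the value once: len(t) if t is not None else 0
def bTextLen (c : List (String × Option String)) : Int :=
  match c.lookup "text" with
  | some (some s) => PySem.Str.len s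
  | _ => 0

-- the fused loop: state (count, total, mn, mx) over the remaining chunks
def bLoop (count total mn mx : Int) :
    List (List (String × Option String)) → Int × Int × Int × Int
  | [] => (count, total, mn, mx)
  | c :: rest =>
    let n := bTextLen c
    bLoop (count + 1) (total + n) (if n < mn then n else mn) (if n > mx then n else mx) rest

def get_chunk_summary_alt (chunks : List (List (String × Option String))) : List (String × Int) :=
  match chunks with
  | [] =>
    [("count", 0), ("total_chars", 0), ("min_chars", 0), ("max_chars", 0), ("avg_chars", 0)]
  | c :: rest =>
    let first := bTextLen c
    let r := bLoop 1 first first first rest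
    [("count", r.1), ("total_chars", r.2.1), ("min_chars", r.2.2.1), ("max_chars", r.2.2.2),
     ("avg_chars", PySem.Int.floordiv r.2.1 r.1)]

-- ===== PRECONDITION & SPEC =====
def Spec_get_chunk_summary (chunks : List (List (String × Option String))) (out : List (String × Int)) : Prop := out = get_chunk_summary_alt chunks
instance (chunks : List (List (String × Option String))) (out : List (String × Int)) : Decidable (Spec_get_chunk_summary chunks out) := by unfold Spec_get_chunk_summary; infer_instance

-- ===== CLAIM (what is proved, stated in full; the proofs are below) =====
def Claim_equal_get_chunk_summary : Prop := ∀ (chunks : List (List (String × Option String))), Dom_get_chunk_summary chunks → Spec_get_chunk_summary chunks (get_chunk_summary chunks)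

-- ===== LEMMAS AND PROOFS =====

lemma bLoop_spec (l : List (List (String × Option String))) :
    ∀ (count total mn mx : Int),
      bLoop count total mn mx l =
        (count + l.length, total + (l.map bTextLen).sum,
         (l.map bTextLen).foldl min mn, (l.map bTextLen).foldl max mx) := by
  induction l with
  | nil => intro count total mn mx; simp [bLoop]
  | cons c rest ih =>
    intro count total mn mx
    have hmin : (if bTextLen c < mn then bTextLen c else mn) = min mn (bTextLen c) := by
      rw [min_def]; split_ifs <;> omega
    have hmax : (if bTextLen c > mx then bTextLen c else mx) = max mx (bTextLen c) := by
      rw [max_def]; split_ifs <;> omega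
    simp only [bLoop, ih, hmin, hmax, List.map_cons, List.sum_cons, List.foldl_cons,
      List.length_cons]
    refine Prod.ext (by push_cast; ring) (Prod.ext (by ring) rfl)

lemma textLen_eq (c : List (String × Option String)) : aTextLen c = bTextLen c := by
  unfold aTextLen bTextLen
  rcases h : c.lookup "text" with _ | (_ | s)
  · rfl
  · rfl
  · by_cases hs : s = ""
    · simp [hs]
    · simp [hs]

theorem get_chunk_summary_eq (chunks : List (List (String × Option String))) :
    get_chunk_summary chunks = get_chunk_summary_alt chunks := by
  match chunks with
  | [] => rfl
  | c :: rest =>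
    simp only [get_chunk_summary, get_chunk_summary_alt, bLoop_spec, textLen_eq,
      List.map_cons, PySem.List.min?_id_cons, PySem.List.max?_id_cons, Option.getD_some,
      List.sum_cons, List.length_cons]
    have hab : List.map aTextLen rest = List.map bTextLen rest :=
      List.map_congr_left (fun x _ => textLen_eq x)
    have h1 : ((rest.length + 1 : Nat) : Int) = 1 + (rest.length : Int) := by push_cast; ring
    rw [hab]
    simp [h1]

-- ===== VERDICT (by name: the statement is the Claim_ definition above) =====
theorem get_chunk_summary_spec : Claim_equal_get_chunk_summary := by
  intro chunks _
  unfold Spec_get_chunk_summary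
  exact get_chunk_summary_eq chunks
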